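-- pv_equiv track=rewrite | github.com/tormach/example_robot_programs | trpl_examples/projects/image_path_extractor_pathpilot/custom_ui.py | join_file_path_from_list
-- ===== SOURCE A (Python) =====
-- def join_file_path_from_list(list):
--     joined_path = ""
--     for i in range(len(list)):
--         if i > 0 and i < len(list) - 1:
--             joined_path += list[i] + "/"
--         else:
--             joined_path += list[i]
--     return joined_path
-- ===== SOURCE B (Python) =====
-- def join_file_path_from_list(list):
--     if not list:
--         return ""
--     return list[0] + "/".join(list[1:])
-- ===== Notes on version B (the rewrite author's own statement) =====
-- stated objective: simpler
-- what changed: Replaced the index loop with per-element position conditionals by a single slice plus str.join: the result is list[0] concatenated with '/'.join(list[1:]).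
import Mathlib
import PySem

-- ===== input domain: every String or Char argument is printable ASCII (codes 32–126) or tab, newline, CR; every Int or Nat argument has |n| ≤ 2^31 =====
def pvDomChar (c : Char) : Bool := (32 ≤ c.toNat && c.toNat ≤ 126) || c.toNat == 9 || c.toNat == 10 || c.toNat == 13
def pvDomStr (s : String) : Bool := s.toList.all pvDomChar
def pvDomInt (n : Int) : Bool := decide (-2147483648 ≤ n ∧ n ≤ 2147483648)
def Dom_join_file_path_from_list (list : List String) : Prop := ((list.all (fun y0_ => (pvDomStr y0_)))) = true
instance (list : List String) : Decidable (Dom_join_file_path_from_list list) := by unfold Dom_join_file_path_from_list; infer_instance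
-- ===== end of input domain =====

-- B replaces A's index loop (which appends "/" only after the middle elements) by a single
-- slice-and-join: list[0] ++ "/".join(list[1:]) — simpler, no per-element position tests.

-- ===== PORT A =====
def join_file_path_from_list (list : List String) : String :=
  (PySem.List.pyRange 0 (PySem.List.len list) 1).foldl
    (fun joined_path i =>
      if 0 < i ∧ i < PySem.List.len list - 1 then
        joined_path ++ (PySem.List.pyGetD list i "" ++ "/")
      else
        joined_path ++ PySem.List.pyGetD list i "") ""

-- ===== PORT B =====
def join_file_path_from_list_alt (list : List String) : String :=
  match list with
  | [] => ""
  | x :: _ => x ++ PySem.Str.join "/" (PySem.List.slice list (some 1) none)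

-- ===== PRECONDITION & SPEC =====
def Spec_join_file_path_from_list (list : List String) (out : String) : Prop := out = join_file_path_from_list_alt list
instance (list : List String) (out : String) : Decidable (Spec_join_file_path_from_list list out) := by unfold Spec_join_file_path_from_list; infer_instance

-- ===== CLAIM (what is proved, stated in full; the proofs are below) =====
def Claim_equal_join_file_path_from_list : Prop := ∀ (list : List String), Dom_join_file_path_from_list list → Spec_join_file_path_from_list list (join_file_path_from_list list)

-- ===== LEMMAS AND PROOFS =====

-- join-with-trailing-slash of every element, A's running accumulator for the middle part
def pvSlashConcat (u : List String) : String := u.foldl (fun acc v => acc ++ (v ++ "/")) ""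

theorem pvFoldlSlash (u : List String) (s : String) :
    u.foldl (fun acc v => acc ++ (v ++ "/")) s = s ++ pvSlashConcat u := by
  induction u generalizing s with
  | nil => simp [pvSlashConcat]
  | cons a u ih =>
    simp only [pvSlashConcat, List.foldl_cons]
    rw [ih, ih ("" ++ (a ++ "/"))]
    simp [String.append_assoc]

theorem pvSlashConcat_cons (a : String) (l : List String) :
    pvSlashConcat (a :: l) = (a ++ "/") ++ pvSlashConcat l := by
  simp only [pvSlashConcat, List.foldl_cons]
  rw [pvFoldlSlash l ("" ++ (a ++ "/"))]
  show "" ++ (a ++ "/") ++ pvSlashConcat l = a ++ "/" ++ pvSlashConcat l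
  simp

theorem pvJoinSnoc (u : List String) (z : String) :
    PySem.Str.join "/" (u ++ [z]) = pvSlashConcat u ++ z := by
  induction u with
  | nil => simp [PySem.Str.join, PySem.Chars.join_singleton, pvSlashConcat]
  | cons a u ih =>
    cases u with
    | nil =>
      show PySem.Str.join "/" [a, z] = pvSlashConcat [a] ++ z
      simp only [PySem.Str.join, List.map_cons, List.map_nil,
        PySem.Chars.join_cons_cons, PySem.Chars.join_singleton]
      rw [String.ofList_append, String.ofList_append, String.ofList_toList,
        String.ofList_toList, String.ofList_toList]
      simp [pvSlashConcat, String.append_assoc]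
    | cons b u' =>
      simp only [PySem.Str.join, List.cons_append, List.map_cons] at ih ⊢
      rw [PySem.Chars.join_cons_cons]
      rw [String.ofList_append, String.ofList_append]
      rw [ih]
      rw [String.ofList_toList, String.ofList_toList, pvSlashConcat_cons a (b :: u')]
      simp [String.append_assoc]

theorem pvA_snoc (x : String) (u : List String) (z : String) :
    join_file_path_from_list (x :: (u ++ [z])) = x ++ (pvSlashConcat u ++ z) := by
  have hlen : PySem.List.len (x :: (u ++ [z])) = (↑u.length + 1) + 1 := by
    simp [PySem.List.len_eq]
  have hrange : PySem.List.pyRange 0 (PySem.List.len (x :: (u ++ [z]))) 1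
      = PySem.List.pyRange 0 (↑u.length + 1) 1 ++ [((u.length : Int) + 1)] := by
    rw [hlen, PySem.List.pyRange_one_succ_right (by positivity)]
  unfold join_file_path_from_list
  rw [hrange, List.foldl_append]
  have hcondlast : ¬ ((0:Int) < ↑u.length + 1 ∧ (↑u.length + 1 : Int) < PySem.List.len (x :: (u ++ [z])) - 1) := by
    rw [hlen]; omega
  rw [List.foldl_cons, List.foldl_nil, if_neg hcondlast]
  have hgetlast : PySem.List.pyGetD (x :: (u ++ [z])) (↑u.length + 1) "" = z := by
    have h1 : ((↑u.length + 1 : Int)) = ((x :: u).length : Int) := by simp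
    rw [h1, PySem.List.pyGetD_natCast]
    show ((x :: u) ++ [z]).getD (x :: u).length "" = z
    rw [List.getD_eq_getElem?_getD, List.getElem?_append_right (by simp)]
    simp
  rw [hgetlast]
  have hpre : (PySem.List.pyRange 0 (↑u.length + 1) 1).foldl
      (fun joined_path i => if 0 < i ∧ i < PySem.List.len (x :: (u ++ [z])) - 1 then
          joined_path ++ (PySem.List.pyGetD (x :: (u ++ [z])) i "" ++ "/")
        else joined_path ++ PySem.List.pyGetD (x :: (u ++ [z])) i "") ""
      = x ++ pvSlashConcat u := by
    rw [PySem.List.foldl_congr_mem _ _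
      (fun joined_path i => if 0 < i then joined_path ++ (PySem.List.pyGetD (x :: u) i "" ++ "/")
        else joined_path ++ PySem.List.pyGetD (x :: u) i "") ""
      (by
        intro acc i hi
        rw [PySem.List.mem_pyRange_one] at hi
        have hget : PySem.List.pyGetD (x :: (u ++ [z])) i "" = PySem.List.pyGetD (x :: u) i "" := by
          rw [PySem.List.pyGetD_eq_getElem _ _ hi.1 (by simp; omega),
            PySem.List.pyGetD_eq_getElem _ _ hi.1 (by simp; omega)]
          show ((x :: u) ++ [z])[i.toNat]'_ = _
          rw [List.getElem_append_left (by simp; omega)]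
        have hc : ((0:Int) < i ∧ i < PySem.List.len (x :: (u ++ [z])) - 1) ↔ (0 < i) := by
          rw [hlen]; omega
        rw [hget]
        simp only [hc])]
    have h01 : PySem.List.pyRange 0 (↑u.length + 1) 1 = 0 :: PySem.List.pyRange 1 (↑u.length + 1) 1 :=
      PySem.List.pyRange_one_cons (by positivity)
    rw [h01, List.foldl_cons, if_neg (by omega), PySem.List.pyGetD_zero_cons]
    rw [PySem.List.foldl_congr_mem _ _
      (fun joined_path i => joined_path ++ (PySem.List.pyGetD (x :: u) i "" ++ "/")) ("" ++ x)
      (by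
        intro acc i hi
        rw [PySem.List.mem_pyRange_one] at hi
        have h0 : (0:Int) < i := by omega
        simp [h0])]
    have hlen2 : (↑u.length + 1 : Int) = PySem.List.len (x :: u) := by simp [PySem.List.len_eq]
    rw [hlen2, PySem.List.foldl_pyRange_pyGetD (x :: u) "" (fun acc v => acc ++ (v ++ "/")) ("" ++ x) (by norm_num)]
    show u.foldl _ ("" ++ x) = x ++ pvSlashConcat u
    rw [pvFoldlSlash u ("" ++ x)]
    simp
  rw [hpre]
  simp [String.append_assoc]

theorem pvA_singleton (x : String) : join_file_path_from_list [x] = x := by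
  have h : PySem.List.pyRange 0 (PySem.List.len ([x] : List String)) 1 = [0] := by
    rw [PySem.List.len_eq]
    show PySem.List.pyRange 0 (0+1) 1 = [0]
    exact PySem.List.pyRange_one_singleton 0
  unfold join_file_path_from_list
  rw [h, List.foldl_cons, List.foldl_nil, if_neg (by rw [PySem.List.len_eq]; simp),
    PySem.List.pyGetD_zero_cons]
  simp

theorem pvAB (l : List String) : join_file_path_from_list l = join_file_path_from_list_alt l := by
  cases l with
  | nil => rfl
  | cons x t =>
    have hB : join_file_path_from_list_alt (x :: t) = x ++ PySem.Str.join "/" t := by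
      simp [join_file_path_from_list_alt, PySem.List.slice_from_one]
    rw [hB]
    rcases t.eq_nil_or_concat with rfl | ⟨u, z, rfl⟩ <;> [skip; rw [List.concat_eq_append]]
    · rw [pvA_singleton]
      simp [PySem.Str.join, PySem.Chars.join_nil]
    · rw [pvA_snoc, pvJoinSnoc]

-- ===== VERDICT (by name: the statement is the Claim_ definition above) =====
theorem join_file_path_from_list_spec : Claim_equal_join_file_path_from_list := by
  intro list _
  exact pvAB list
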